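-- pv_equiv track=rewrite | github.com/wfxronald/peeyoubot | piubotpgapi.py | prettify_group_string
-- ===== SOURCE A (Python) =====
-- def prettify_group_string(arr):
--     arr_of_str = []
--     counter = 1
--     string = ""
--     for index in range(len(arr)):
--         # trim message every 50 items
--         if counter > 50:
--             arr_of_str.append(string)
--             counter = 1
--             string = ""
--
--         ele = arr[index]
--         if index == len(arr) - 1:
--             string = string + str(index+1) + r'\. ' + ele
--         else:
--             string = string + str(index+1) + r'\. ' + ele + "\n"
--         counter += 1
--     if string:
--         arr_of_str.append(string)
--     return arr_of_str
-- ===== SOURCE B (Python) =====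
-- def prettify_group_string(arr):
--     result = []
--     n = len(arr)
--     for start in range(0, n, 50):
--         chunk = arr[start:start + 50]
--         parts = [str(start + j + 1) + '\\. ' + ele for j, ele in enumerate(chunk)]
--         s = '\n'.join(parts)
--         if start + len(chunk) < n:
--             s += '\n'
--         result.append(s)
--     return result
-- ===== Notes on version B (the rewrite author's own statement) =====
-- stated objective: simpler
-- what changed: Replaces A's single flat pass with a manually reset chunk counter and an incrementally grown string by a partition-then-join pass: slice the array into 50-item chunks, build the numbered lines of each chunk as a list and '\n'.join them, appending the separator newline only to non-final chunks.
import Mathlib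
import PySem

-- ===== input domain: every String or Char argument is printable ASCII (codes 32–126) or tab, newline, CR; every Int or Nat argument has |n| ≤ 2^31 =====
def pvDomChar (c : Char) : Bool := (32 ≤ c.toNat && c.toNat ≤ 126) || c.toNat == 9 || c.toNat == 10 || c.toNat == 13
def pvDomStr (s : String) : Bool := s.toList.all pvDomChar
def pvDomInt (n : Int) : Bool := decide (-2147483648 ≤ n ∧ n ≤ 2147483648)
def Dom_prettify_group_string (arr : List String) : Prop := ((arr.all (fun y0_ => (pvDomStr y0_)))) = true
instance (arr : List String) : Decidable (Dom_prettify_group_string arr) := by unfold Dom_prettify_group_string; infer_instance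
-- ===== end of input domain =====

-- B replaces A's flat counter-resetting pass by a partition-into-50-chunks-then-join pass (simpler structure, same values).

-- ===== PORT A =====
-- the loop 'for index in range(len(arr))' as structural recursion on the remaining
-- suffix, carrying (index, counter, string, arr_of_str) exactly as A does
def pvLoopA : List String → Nat → Nat → Int → String → List String → List String × Int × String
  | [], _, _, counter, s, acc => (acc, counter, s)
  | ele :: rest, index, total, counter, s, acc =>
    let st := if counter > 50 then (acc ++ [s], (1 : Int), "") else (acc, counter, s)
    let s' := if index = total - 1
              then st.2.2 ++ PySem.Int.toStr ((index : Int) + 1) ++ "\\. " ++ ele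
              else st.2.2 ++ PySem.Int.toStr ((index : Int) + 1) ++ "\\. " ++ ele ++ "\n"
    pvLoopA rest (index + 1) total (st.2.1 + 1) s' st.1

-- the trailing 'if string: arr_of_str.append(string)'
def pvFinishA (r : List String × Int × String) : List String :=
  if r.2.2 ≠ "" then r.1 ++ [r.2.2] else r.1

def prettify_group_string (arr : List String) : List String :=
  pvFinishA (pvLoopA arr 0 arr.length 1 "" [])

-- ===== PORT B =====
def prettify_group_string_alt (arr : List String) : List String :=
  let n : Int := PySem.List.len arr
  (PySem.List.pyRange 0 n 50).foldl (fun result start =>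
    let chunk := PySem.List.slice arr (some start) (some (start + 50))
    let parts := (PySem.List.enumerate chunk).map
      (fun je => PySem.Int.toStr (start + je.1 + 1) ++ "\\. " ++ je.2)
    let s := PySem.Str.join "\n" parts
    let s := if start + (chunk.length : Int) < n then s ++ "\n" else s
    result ++ [s]) []

-- ===== PRECONDITION & SPEC =====
def Spec_prettify_group_string (arr : List String) (out : List String) : Prop := out = prettify_group_string_alt arr
instance (arr : List String) (out : List String) : Decidable (Spec_prettify_group_string arr out) := by unfold Spec_prettify_group_string; infer_instance

-- ===== CLAIM (what is proved, stated in full; the proofs are below) =====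
def Claim_equal_prettify_group_string : Prop := ∀ (arr : List String), Dom_prettify_group_string arr → Spec_prettify_group_string arr (prettify_group_string arr)

-- ===== LEMMAS AND PROOFS =====

-- the numbered lines of a chunk starting at global offset off, every line with a trailing newline
def pvCatNL : List String → Int → String
  | [], _ => ""
  | e :: r, off => PySem.Int.toStr (off + 1) ++ "\\. " ++ e ++ "\n" ++ pvCatNL r (off + 1)

-- the numbered lines, the LAST line without a newline
def pvCatLast : List String → Int → String
  | [], _ => ""
  | [e], off => PySem.Int.toStr (off + 1) ++ "\\. " ++ e
  | e :: r, off => PySem.Int.toStr (off + 1) ++ "\\. " ++ e ++ "\n" ++ pvCatLast r (off + 1)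

-- the common shape of both programs' results: one string per 50-chunk
def pvChunks : List String → Int → List String
  | [], _ => []
  | e :: r, off =>
    (if r.length + 1 ≤ 50 then pvCatLast ((e :: r).take 50) off else pvCatNL ((e :: r).take 50) off)
      :: pvChunks (r.drop 49) (off + 50)
  termination_by tail _ => tail.length
  decreasing_by simp

theorem pvChunks_cons (tail : List String) (off : Int) (h : tail ≠ []) :
    pvChunks tail off =
      (if tail.length ≤ 50 then pvCatLast (tail.take 50) off else pvCatNL (tail.take 50) off)
        :: pvChunks (tail.drop 50) (off + 50) := by
  cases tail with
  | nil => exact absurd rfl h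
  | cons e r => rw [pvChunks.eq_def]; simp

theorem pvCatLast_nil (off : Int) : pvCatLast [] off = "" := rfl
theorem pvCatLast_one (e : String) (off : Int) :
    pvCatLast [e] off = PySem.Int.toStr (off + 1) ++ "\\. " ++ e := rfl
theorem pvCatLast_cons2 (e e2 : String) (r2 : List String) (off : Int) :
    pvCatLast (e :: e2 :: r2) off =
      PySem.Int.toStr (off + 1) ++ "\\. " ++ e ++ "\n" ++ pvCatLast (e2 :: r2) (off + 1) := rfl

theorem pvCatNL_eq_catLast (c : List String) (off : Int) (h : c ≠ []) :
    pvCatNL c off = pvCatLast c off ++ "\n" := by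
  induction c generalizing off with
  | nil => exact absurd rfl h
  | cons e r ih =>
    cases r with
    | nil => simp [pvCatNL, pvCatLast_one, String.append_assoc]
    | cons e2 r2 =>
      rw [pvCatNL, ih (off + 1) (by simp), pvCatLast_cons2]
      simp [String.append_assoc]

theorem pvCat_head_ne (e : String) (r : List String) (off : Int) :
    pvCatLast (e :: r) off ≠ "" := by
  intro h
  have h2 := congrArg String.toList h
  have h3 : ("\\. " : String).toList = ['\\', '.', ' '] := rfl
  cases r with
  | nil => rw [pvCatLast_one] at h2; simp only [String.toList_append] at h2; simp [h3] at h2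
  | cons e2 r2 => rw [pvCatLast_cons2] at h2; simp only [String.toList_append] at h2; simp [h3] at h2

-- ===== A-side lemmas =====

theorem pvLoopA_append (c rest : List String) (off total : Nat) (counter : Int)
    (s : String) (acc : List String) :
    pvLoopA (c ++ rest) off total counter s acc =
      pvLoopA rest (off + c.length) total (pvLoopA c off total counter s acc).2.1
        (pvLoopA c off total counter s acc).2.2 (pvLoopA c off total counter s acc).1 := by
  induction c generalizing off counter s acc with
  | nil => simp [pvLoopA]
  | cons e r ih =>
    have harith : off + 1 + r.length = off + (r.length + 1) := by omega
    simp only [List.cons_append, pvLoopA, List.length_cons]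
    rw [ih, harith]

-- running A over a block in which no element is the global last and the counter never
-- overflows: the string grows by pvCatNL, nothing is flushed
theorem pvLoopA_nl (c : List String) (off total : Nat) (counter : Int) (s : String)
    (acc : List String) (h1 : 1 ≤ counter) (h2 : counter + c.length ≤ 51)
    (h3 : off + c.length < total) :
    pvLoopA c off total counter s acc = (acc, counter + c.length, s ++ pvCatNL c ↑off) := by
  induction c generalizing off counter s with
  | nil => simp [pvLoopA, pvCatNL]
  | cons e r ih =>
    have hnof : ¬ ((counter : Int) > 50) := by
      simp only [List.length_cons] at h2; push_cast at h2; omega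
    have hnl : off ≠ total - 1 := by simp only [List.length_cons] at h3; omega
    simp only [pvLoopA, if_neg hnof, if_neg hnl]
    rw [ih (off + 1) (counter + 1) _ (by omega)
      (by simp only [List.length_cons] at h2 ⊢; push_cast at h2 ⊢; omega)
      (by simp only [List.length_cons] at h3 ⊢; omega)]
    rw [Prod.mk.injEq, Prod.mk.injEq]
    refine ⟨rfl, by push_cast [List.length_cons, List.length_nil]; ring, ?_⟩
    rw [pvCatNL]
    push_cast
    simp [String.append_assoc]

-- running A over the FINAL block: the last element gets no newline
theorem pvLoopA_last (c : List String) (off total : Nat) (counter : Int) (s : String)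
    (acc : List String) (h1 : 1 ≤ counter) (h2 : counter + c.length ≤ 51)
    (h3 : off + c.length = total) :
    pvLoopA c off total counter s acc = (acc, counter + c.length, s ++ pvCatLast c ↑off) := by
  induction c generalizing off counter s with
  | nil => simp [pvLoopA, pvCatLast]
  | cons e r ih =>
    have hnof : ¬ ((counter : Int) > 50) := by
      simp only [List.length_cons] at h2; push_cast at h2; omega
    cases r with
    | nil =>
      have hlast : off = total - 1 := by simp at h3; omega
      simp only [pvLoopA, if_neg hnof, if_pos hlast]
      rw [pvCatLast_one, Prod.mk.injEq, Prod.mk.injEq]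
      refine ⟨rfl, by push_cast [List.length_cons, List.length_nil]; ring, ?_⟩
      simp [String.append_assoc]
    | cons e2 r2 =>
      have hnl : off ≠ total - 1 := by simp only [List.length_cons] at h3; omega
      rw [pvLoopA]
      simp only [if_neg hnof, if_neg hnl]
      rw [ih (off + 1) (counter + 1) _ (by omega)
        (by simp only [List.length_cons] at h2 ⊢; push_cast at h2 ⊢; omega)
        (by simp only [List.length_cons] at h3 ⊢; omega)]
      rw [Prod.mk.injEq, Prod.mk.injEq]
      refine ⟨rfl, by push_cast [List.length_cons, List.length_nil]; ring, ?_⟩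
      rw [pvCatLast_cons2]
      push_cast
      simp [String.append_assoc]

-- the flush at the start of a new chunk: an overflowing counter with a pending string
-- equals counter 1 with the string already appended
theorem pvLoopA_flush (rest : List String) (off total : Nat) (counter : Int) (s : String)
    (acc : List String) (h : rest ≠ []) (hc : counter > 50) :
    pvLoopA rest off total counter s acc = pvLoopA rest off total 1 "" (acc ++ [s]) := by
  cases rest with
  | nil => exact absurd rfl h
  | cons e r =>
    simp only [pvLoopA, if_pos hc, if_neg (by norm_num : ¬ ((1 : Int) > 50))]

theorem pvLoopA_main (n : Nat) (tail : List String) (off total : Nat) (acc : List String)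
    (hn : tail.length ≤ n) (ht : off + tail.length = total) :
    pvFinishA (pvLoopA tail off total 1 "" acc) = acc ++ pvChunks tail ↑off := by
  induction n generalizing tail off acc with
  | zero =>
    have : tail = [] := List.eq_nil_of_length_eq_zero (by omega)
    subst this
    simp [pvLoopA, pvFinishA, pvChunks]
  | succ m ih =>
    cases htail : tail with
    | nil => simp [pvLoopA, pvFinishA, pvChunks]
    | cons e r =>
      subst htail
      by_cases hle : (e :: r).length ≤ 50
      · rw [pvLoopA_last _ _ _ _ _ _ (by omega) (by omega) ht]
        rw [pvChunks_cons _ _ (by simp), if_pos hle]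
        have hdrop : (e :: r).drop 50 = [] := List.drop_eq_nil_iff.mpr (by omega)
        rw [List.take_of_length_le hle, hdrop]
        simp only [pvFinishA, pvChunks]
        rw [if_pos (by simpa using pvCat_head_ne e r ↑off)]
        simp
      · -- more than 50 elements: the first 50 form a full, non-final chunk
        have hlen50 : ((e :: r).take 50).length = 50 := by
          simp only [List.length_take]; simp only [List.length_cons] at hle ⊢; omega
        have hrest : (e :: r).drop 50 ≠ [] := by
          intro hnil
          have h' := List.drop_eq_nil_iff.mp hnil
          have hle' := hle
          simp only [List.length_cons] at h' hle'
          omega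
        conv_lhs => rw [(List.take_append_drop 50 (e :: r)).symm]
        rw [pvLoopA_append]
        rw [pvLoopA_nl ((e :: r).take 50) off total 1 "" acc (by omega) (by rw [hlen50]; norm_num)
          (by simp only [List.length_cons] at ht hle; rw [hlen50]; omega)]
        simp only [hlen50]
        rw [pvLoopA_flush _ _ _ _ _ _ hrest (by norm_num)]
        rw [ih ((e :: r).drop 50) (off + 50) (acc ++ ["" ++ pvCatNL ((e :: r).take 50) ↑off])
          (by simp only [List.length_drop]; omega) (by simp only [List.length_drop]; omega)]
        rw [pvChunks_cons (e :: r) ↑off (by simp), if_neg hle]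
        simp [List.append_assoc]

-- ===== B-side lemmas =====

theorem pvStrExt {s t : String} (h : s.toList = t.toList) : s = t := String.toList_inj.mp h

theorem pvPyRange50_nil (a b : Int) (h : b ≤ a) : PySem.List.pyRange a b 50 = [] := by
  rw [PySem.List.pyRange_of_pos a b (by norm_num), if_neg (by omega)]
  simp

theorem pvPyRange50_cons (a b : Int) (h : a < b) :
    PySem.List.pyRange a b 50 = a :: PySem.List.pyRange (a + 50) b 50 := by
  rw [PySem.List.pyRange_of_pos a b (by norm_num),
      PySem.List.pyRange_of_pos (a + 50) b (by norm_num), if_pos h]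
  by_cases h2 : a + 50 < b
  · rw [if_pos h2]
    have hN : ((b - a + 50 - 1) / 50).toNat = ((b - (a + 50) + 50 - 1) / 50).toNat + 1 := by omega
    rw [hN, List.range_succ_eq_map]
    simp only [List.map_cons, List.map_map, Nat.cast_zero, mul_zero, add_zero, List.cons.injEq]
    refine ⟨by trivial, List.map_congr_left fun k _ => ?_⟩
    simp only [Function.comp_apply]
    push_cast; ring
  · rw [if_neg h2]
    have hN : ((b - a + 50 - 1) / 50).toNat = 1 := by omega
    rw [hN]
    simp

theorem pvJoin_singleton (p : String) : PySem.Str.join "\n" [p] = p :=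
  pvStrExt (by simp [PySem.Str.toList_join, PySem.Chars.join_singleton])

theorem pvJoin_cons_cons (p q : String) (rest : List String) :
    PySem.Str.join "\n" (p :: q :: rest) = p ++ "\n" ++ PySem.Str.join "\n" (q :: rest) :=
  pvStrExt (by simp [PySem.Str.toList_join, PySem.Chars.join_cons_cons, String.toList_append])

theorem pvJoin_parts (c : List String) (b s : Int) :
    PySem.Str.join "\n" ((PySem.List.enumerate c s).map
      (fun je => PySem.Int.toStr (b + je.1 + 1) ++ "\\. " ++ je.2)) = pvCatLast c (b + s) := by
  induction c generalizing s with
  | nil =>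
    simp only [PySem.List.enumerate_nil, List.map_nil, pvCatLast_nil]
    exact pvStrExt (by simp [PySem.Str.toList_join, PySem.Chars.join_nil])
  | cons e r ih =>
    cases r with
    | nil =>
      simp only [PySem.List.enumerate_cons, PySem.List.enumerate_nil, List.map_cons, List.map_nil]
      rw [pvJoin_singleton, pvCatLast_one]
    | cons e2 r2 =>
      simp only [PySem.List.enumerate_cons, List.map_cons] at ih ⊢
      rw [pvJoin_cons_cons, ih (s + 1), pvCatLast_cons2]
      have : b + (s + 1) = b + s + 1 := by ring
      rw [this]

theorem pvB_fold (n : Nat) (arr : List String) (off : Nat) (acc : List String)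
    (hn : arr.length - off ≤ n) :
    (PySem.List.pyRange ↑off ↑arr.length 50).foldl (fun result start =>
      let chunk := PySem.List.slice arr (some start) (some (start + 50))
      let parts := (PySem.List.enumerate chunk).map
        (fun je => PySem.Int.toStr (start + je.1 + 1) ++ "\\. " ++ je.2)
      let s := PySem.Str.join "\n" parts
      let s := if start + (chunk.length : Int) < (arr.length : Int) then s ++ "\n" else s
      result ++ [s]) acc = acc ++ pvChunks (arr.drop off) ↑off := by
  induction n generalizing off acc with
  | zero =>
    have hge : arr.length ≤ off := by omega
    rw [pvPyRange50_nil _ _ (by exact_mod_cast hge), List.drop_eq_nil_iff.mpr hge]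
    simp [pvChunks]
  | succ m ih =>
    by_cases hlt : off < arr.length
    · rw [pvPyRange50_cons _ _ (by exact_mod_cast hlt), List.foldl_cons]
      have hslice : PySem.List.slice arr (some ↑off) (some (↑off + 50)) =
          (arr.drop off).take 50 := by
        have h50 : ((off : Int) + 50) = ((off : Int) + ((50 : Nat) : Int)) := by push_cast; ring
        rw [h50, PySem.List.slice_natCast_add]
      simp only [hslice]
      have hjoin := pvJoin_parts ((arr.drop off).take 50) ↑off 0
      rw [add_zero] at hjoin
      have hlen : ((arr.drop off).take 50).length = min 50 (arr.length - off) := by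
        simp [List.length_take]
      have hcast : ((off : Int) + 50) = ((off + 50 : Nat) : Int) := by push_cast; ring
      rw [hjoin, hcast, ih (off + 50) _ (by omega)]
      rw [show List.drop (off + 50) arr = List.drop 50 (List.drop off arr) from by
        rw [List.drop_drop]]
      rw [pvChunks_cons (arr.drop off) ↑off (by
        intro hnil; exact absurd (List.drop_eq_nil_iff.mp hnil) (by omega))]
      have hlendrop : (arr.drop off).length = arr.length - off := List.length_drop
      by_cases hfin : (arr.drop off).length ≤ 50
      · rw [if_neg (by rw [hlen]; push_cast; omega), if_pos hfin]
        push_cast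
        simp [List.append_assoc]
      · rw [if_pos (by rw [hlen]; push_cast; omega), if_neg hfin]
        rw [pvCatNL_eq_catLast _ _ (by
          intro hnil
          have := congrArg List.length hnil
          rw [hlen] at this
          simp at this
          omega)]
        push_cast
        simp [List.append_assoc]
    · rw [pvPyRange50_nil _ _ (by exact_mod_cast Nat.le_of_not_lt hlt),
        List.drop_eq_nil_iff.mpr (by omega)]
      simp [pvChunks]

-- ===== VERDICT (by name: the statement is the Claim_ definition above) =====
theorem prettify_group_string_spec : Claim_equal_prettify_group_string := by
  intro arr _
  show prettify_group_string arr = prettify_group_string_alt arr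
  exact (pvLoopA_main arr.length arr 0 arr.length [] le_rfl (by omega)).trans
    (pvB_fold arr.length arr 0 [] (by omega)).symm
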